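-- pv_equiv track=rewrite | github.com/ananyabatra04/SymbolLLM | baseline.py | format_statements
-- ===== SOURCE A (Python) =====
-- def format_statements(prolog_code):
--     """
--     Reformat Prolog code to ensure statements are properly grouped and complete.
--     """
--     statements, temp = [], []
--
--     for line in prolog_code.splitlines(): # split by new line
--         line = line.strip()
--         if line and not line.startswith("%"): # ignore comments and empty lines
--             temp.append(line)
--             if line.endswith('.'):
--                 statements.append(" ".join(temp))
--                 temp.clear()
--
--     return statements
-- ===== SOURCE B (Python) =====
-- def format_statements(prolog_code):
--     cleaned = [s for s in (l.strip() for l in prolog_code.splitlines())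
--                if s and not s.startswith("%")]
--
--     def chop(lines):
--         i = next((i for i, s in enumerate(lines) if s.endswith('.')), None)
--         if i is None:
--             return []
--         return [" ".join(lines[:i + 1])] + chop(lines[i + 1:])
--
--     return chop(cleaned)
-- ===== Notes on version B (the rewrite author's own statement) =====
-- stated objective: alternative
-- what changed: A's single accumulate-and-flush loop with a mutable temp buffer is replaced by a clean-first pass (strip, drop empties and % comments) followed by a recursive splitter that finds the first '.'-terminated line, emits the joined prefix and recurses on the rest, implicitly discarding an unterminated tail.
import Mathlib
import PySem

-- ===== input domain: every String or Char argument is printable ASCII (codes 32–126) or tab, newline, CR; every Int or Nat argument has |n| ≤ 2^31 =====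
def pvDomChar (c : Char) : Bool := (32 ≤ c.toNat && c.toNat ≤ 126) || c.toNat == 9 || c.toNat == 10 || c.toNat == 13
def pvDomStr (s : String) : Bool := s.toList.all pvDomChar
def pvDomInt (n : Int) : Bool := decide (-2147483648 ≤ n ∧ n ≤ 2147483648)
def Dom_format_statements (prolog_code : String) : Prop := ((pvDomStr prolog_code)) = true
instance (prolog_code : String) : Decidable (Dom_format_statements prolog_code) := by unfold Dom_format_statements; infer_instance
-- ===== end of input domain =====

-- B replaces A's accumulate-and-flush buffer by a clean-first pass plus a recursive
-- splitter at the first '.'-terminated line (objective: alternative decomposition, same cost).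

-- ===== PORT A =====
-- accumulate lines in temp, flush to statements whenever a stripped line ends with '.'
def format_statements (prolog_code : String) : List String :=
  ((PySem.Str.splitlines prolog_code).foldl
    (fun (st : List String × List String) line =>
      let line := PySem.Str.strip line
      if line ≠ "" ∧ PySem.Str.startswith line "%" = false then
        let temp := st.2 ++ [line]
        if PySem.Str.endswith line "." = true then
          (st.1 ++ [PySem.Str.join " " temp], [])
        else
          (st.1, temp)
      else st)
    ([], [])).1

-- ===== PORT B =====
-- chop: emit everything up to the first '.'-terminated line, recurse on the rest;
-- findIdx? is the port of Source B's next((i for i, s in enumerate(lines) if s.endswith('.')), None)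
def pvChop (lines : List String) : List String :=
  match h : lines.findIdx? (fun s => PySem.Str.endswith s ".") with
  | none => []
  | some i =>
      [PySem.Str.join " " (PySem.List.slice lines none (some ((i : Int) + 1)))] ++
        pvChop (PySem.List.slice lines (some ((i : Int) + 1)) none)
termination_by lines.length
decreasing_by
  have hi : i < lines.length := List.findIdx?_eq_some_iff_findIdx_eq.mp h |>.1
  have : ((i : Int) + 1) = ((i + 1 : Nat) : Int) := by push_cast; ring
  rw [this, PySem.List.slice_from_natCast, List.length_drop]
  omega

def format_statements_alt (prolog_code : String) : List String :=
  pvChop (((PySem.Str.splitlines prolog_code).map PySem.Str.strip).filter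
    (fun s => decide (s ≠ "") && !PySem.Str.startswith s "%"))

-- ===== PRECONDITION & SPEC =====
def Spec_format_statements (prolog_code : String) (out : List String) : Prop := out = format_statements_alt prolog_code
instance (prolog_code : String) (out : List String) : Decidable (Spec_format_statements prolog_code out) := by unfold Spec_format_statements; infer_instance

-- ===== CLAIM (what is proved, stated in full; the proofs are below) =====
def Claim_equal_format_statements : Prop := ∀ (prolog_code : String), Dom_format_statements prolog_code → Spec_format_statements prolog_code (format_statements prolog_code)

-- ===== LEMMAS AND PROOFS =====

-- A's flush step on an already-cleaned line (conditions in Chars form, the simp normal form)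
def pvStepC (st : List String × List String) (l : String) : List String × List String :=
  if PySem.Chars.endswith l.toList ['.'] = true then
    (st.1 ++ [PySem.Str.join " " (st.2 ++ [l])], [])
  else
    (st.1, st.2 ++ [l])

-- A's flush loop, written as recursion carrying the pending buffer
def pvChopAux (temp : List String) : List String → List String
  | [] => []
  | l :: ls =>
      if PySem.Chars.endswith l.toList ['.'] = true then
        PySem.Str.join " " (temp ++ [l]) :: pvChopAux [] ls
      else
        pvChopAux (temp ++ [l]) ls

theorem pvStepA_eq (st : List String × List String) (l : String) :
    (let line := PySem.Str.strip l
     if line ≠ "" ∧ PySem.Str.startswith line "%" = false then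
       let temp := st.2 ++ [line]
       if PySem.Str.endswith line "." = true then
         (st.1 ++ [PySem.Str.join " " temp], [])
       else
         (st.1, temp)
     else st)
    = if (decide (PySem.Str.strip l ≠ "") && !PySem.Str.startswith (PySem.Str.strip l) "%") = true
      then pvStepC st (PySem.Str.strip l) else st := by
  by_cases h1 : PySem.Str.strip l = ""
  · simp [h1]
  · by_cases h2 : PySem.Chars.startswith (PySem.Chars.strip l.toList) ['%'] = true
    · simp [h1, h2]
    · simp [h1, h2, pvStepC]

theorem pvFoldA_eq_foldC (lines : List String) (st : List String × List String) :
    List.foldl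
      (fun (st : List String × List String) line =>
        let line := PySem.Str.strip line
        if line ≠ "" ∧ PySem.Str.startswith line "%" = false then
          let temp := st.2 ++ [line]
          if PySem.Str.endswith line "." = true then
            (st.1 ++ [PySem.Str.join " " temp], [])
          else
            (st.1, temp)
        else st) st lines
    = List.foldl pvStepC st
        ((lines.map PySem.Str.strip).filter
          (fun s => decide (s ≠ "") && !PySem.Str.startswith s "%")) := by
  rw [List.foldl_filter, List.foldl_map]
  apply PySem.List.foldl_congr_mem
  exact fun st' l _ => pvStepA_eq st' l

theorem pvFoldC_eq_chopAux (ls : List String) (stmts temp : List String) :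
    (List.foldl pvStepC (stmts, temp) ls).1 = stmts ++ pvChopAux temp ls := by
  induction ls generalizing stmts temp with
  | nil => simp [pvChopAux]
  | cons l ls ih =>
      by_cases h : PySem.Chars.endswith l.toList ['.'] = true <;>
        simp [pvStepC, pvChopAux, h, ih]

theorem pvChopAux_characterization (ls temp : List String) :
    pvChopAux temp ls =
      match ls.findIdx? (fun s => PySem.Chars.endswith s.toList ['.']) with
      | none => []
      | some i =>
          PySem.Str.join " " (temp ++ ls.take (i + 1)) :: pvChopAux [] (ls.drop (i + 1)) := by
  induction ls generalizing temp with
  | nil => simp [pvChopAux]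
  | cons l ls ih =>
      by_cases h : PySem.Chars.endswith l.toList ['.'] = true
      · simp [pvChopAux, h, List.findIdx?_cons]
      · have hstep : pvChopAux temp (l :: ls) = pvChopAux (temp ++ [l]) ls := by
          simp [pvChopAux, h]
        rw [hstep, ih]
        cases hf : ls.findIdx? (fun s => PySem.Chars.endswith s.toList ['.']) with
        | none => simp [List.findIdx?_cons, h, hf]
        | some i => simp [List.findIdx?_cons, h, hf]

theorem pvChop_eq_nil (ls : List String)
    (h : ls.findIdx? (fun s => PySem.Chars.endswith s.toList ['.']) = none) :
    pvChop ls = [] := by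
  rw [pvChop.eq_def]
  split
  · rfl
  · rename_i i h'
    simp only [PySem.Str.endswith_eq] at h'
    rw [show ("." : String).toList = ['.'] from rfl] at h'
    rw [h] at h'
    cases h'

theorem pvChop_eq_cons (ls : List String) (i : Nat)
    (h : ls.findIdx? (fun s => PySem.Chars.endswith s.toList ['.']) = some i) :
    pvChop ls = PySem.Str.join " " (ls.take (i + 1)) :: pvChop (ls.drop (i + 1)) := by
  rw [pvChop.eq_def]
  split
  · rename_i h'
    simp only [PySem.Str.endswith_eq] at h'
    rw [show ("." : String).toList = ['.'] from rfl] at h'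
    rw [h] at h'
    cases h'
  · rename_i j h'
    simp only [PySem.Str.endswith_eq] at h'
    rw [show ("." : String).toList = ['.'] from rfl] at h'
    rw [h] at h'
    injection h' with hj
    subst hj
    have hc : ((i : Int) + 1) = ((i + 1 : Nat) : Int) := by push_cast; ring
    rw [hc, PySem.List.slice_from_natCast, PySem.List.slice_to_natCast]
    rfl

theorem pvChopAux_nil_eq_chop (ls : List String) : pvChopAux [] ls = pvChop ls := by
  induction hn : ls.length using Nat.strong_induction_on generalizing ls with
  | _ n ih =>
    rw [pvChopAux_characterization]
    cases hf : ls.findIdx? (fun s => PySem.Chars.endswith s.toList ['.']) with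
    | none => rw [pvChop_eq_nil ls hf]
    | some i =>
        have hi : i < ls.length := List.findIdx?_eq_some_iff_findIdx_eq.mp hf |>.1
        rw [pvChop_eq_cons ls i hf]
        simp only [List.nil_append]
        congr 1
        exact ih (ls.drop (i + 1)).length (by subst hn; simp; omega) _ rfl

-- ===== VERDICT (by name: the statement is the Claim_ definition above) =====
theorem format_statements_spec : Claim_equal_format_statements := by
  intro pc _
  unfold Spec_format_statements format_statements format_statements_alt
  rw [pvFoldA_eq_foldC, pvFoldC_eq_chopAux, pvChopAux_nil_eq_chop, List.nil_append]
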